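-- pv_equiv track=rewrite | github.com/ShivamS-9/probabilistic-autocomplete-and-cfg-parser | Compiler with tokenization and CFG parsing/CYK.py | cykCheck
-- ===== SOURCE A (Python) =====
-- def cykCheck(grammar, tokens):
--     n = len(tokens)
--     dp = [[set() for _ in range(n + 1)] for _ in range(n + 1)]
--
-- # using dp matrix
--
--     for i in range(1, n + 1):
--         for keys in grammar:
--             for j in range(n):
--                 if tokens[j] in grammar[keys]:
--                     dp[j + 1][j + 1].add(keys)
--                 if tokens[j] not in ('if', 'else'):
--                     dp[j + 1][j + 1].add('K')
--
--     for l in range(2, n + 1):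
--         for i in range(1, n - l + 2):
--             j = i + l - 1
--             for k in range(i, j):
--                 for keys in grammar:
--                     for value in grammar[keys]:
--                         if value not in tokens and len(value) == 2:
--                             if all(v in dp[i][k] for v in value[:1]) and all(v in dp[k + 1][j] for v in value[1:]):
--                                 dp[i][j].add(keys)
--
--     return 'S' in dp[1][n]
-- ===== SOURCE B (Python) =====
-- def cykCheck(grammar, tokens):
--     n = len(tokens)
--     token_set = set(tokens)
--     binary = {}
--     for key, values in grammar.items():
--         binary[key] = [(v[0], v[1]) for v in values
--                        if len(v) == 2 and v not in token_set]
--     memo = {}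
--
--     def derives(sym, i, j):
--         key = (sym, i, j)
--         if key in memo:
--             return memo[key]
--         if i == j:
--             tok = tokens[i]
--             res = (sym in grammar and tok in grammar[sym]) or \
--                   (sym == 'K' and tok not in ('if', 'else'))
--         else:
--             res = False
--             for b, c in binary.get(sym, []):
--                 for k in range(i, j):
--                     if derives(b, i, k) and derives(c, k + 1, j):
--                         res = True
--                         break
--                 if res:
--                     break
--         memo[key] = res
--         return res
--
--     return n > 0 and derives('S', 0, n - 1)
-- ===== Notes on version B (the rewrite author's own statement) =====
-- stated objective: faster
-- what changed: B replaces A's bottom-up dp table (with its n-times-repeated diagonal fill and per-cell rescans of the whole grammar) by a top-down memoized recursion derives(sym,i,j) on spans, querying only 'S' at the full span, with the binary rules per symbol precomputed once against a token set.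
import Mathlib
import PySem

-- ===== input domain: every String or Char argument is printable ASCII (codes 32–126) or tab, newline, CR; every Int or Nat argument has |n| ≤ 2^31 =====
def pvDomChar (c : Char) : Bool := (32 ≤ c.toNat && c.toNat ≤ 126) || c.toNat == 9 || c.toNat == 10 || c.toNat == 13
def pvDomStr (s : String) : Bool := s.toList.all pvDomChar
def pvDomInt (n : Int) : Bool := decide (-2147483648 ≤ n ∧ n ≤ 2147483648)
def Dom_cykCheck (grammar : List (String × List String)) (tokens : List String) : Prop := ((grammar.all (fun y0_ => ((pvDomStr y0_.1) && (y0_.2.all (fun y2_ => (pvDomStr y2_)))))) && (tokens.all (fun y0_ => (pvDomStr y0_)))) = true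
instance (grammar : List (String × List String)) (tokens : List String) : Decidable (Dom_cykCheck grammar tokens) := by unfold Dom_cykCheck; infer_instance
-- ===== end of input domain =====

-- B replaces A's bottom-up dp table (with its n-times-repeated diagonal fill and per-cell
-- grammar rescans) by a top-down memoized recursion on spans; objective: faster.

-- ===== PORT A =====
-- The dp matrix of sets is modelled as a dictionary keyed by the cell coordinates,
-- every cell defaulting to the empty set exactly as the comprehension initialises it
-- (only in-range cells are ever read or written by A's loops).
abbrev pvGrid : Type := PySem.Dict (Nat × Nat) (PySem.Set String)

-- dp[i][j]
def pvGridGet (dp : pvGrid) (i j : Nat) : PySem.Set String :=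
  dp.getD (i, j) PySem.Set.empty

-- dp[i][j].add(x)
def pvGridAdd (dp : pvGrid) (i j : Nat) (x : String) : pvGrid :=
  dp.insert (i, j) (PySem.Set.add (pvGridGet dp i j) x)

-- body of 'for j in range(n)' inside 'for keys in grammar' (diagonal fill);
-- grammar[keys] is kv.2 (dict iteration: each key once); tokens.getD j "" is tokens[j] (j < n always)
def pvDiagBody (tokens : List String) (kv : String × List String) (dp : pvGrid) (j : Nat) : pvGrid :=
  let dp := if kv.2.contains (tokens.getD j "") then pvGridAdd dp (j+1) (j+1) kv.1 else dp
  if !((["if", "else"] : List String).contains (tokens.getD j "")) then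
    pvGridAdd dp (j+1) (j+1) "K"
  else dp

def pvDiagJ (tokens : List String) (kv : String × List String) (dp : pvGrid) : pvGrid :=
  (List.range tokens.length).foldl (pvDiagBody tokens kv) dp

-- 'for keys in grammar: for j in range(n): …'
def pvDiagA (grammar : List (String × List String)) (tokens : List String) (dp : pvGrid) : pvGrid :=
  grammar.foldl (fun dp kv => pvDiagJ tokens kv dp) dp

-- 'all(v in dp[i][k] for v in value[:1]) and all(v in dp[k+1][j] for v in value[1:])'
def pvCondA (dp : pvGrid) (i k j : Nat) (v : String) : Bool :=
  (v.toList.take 1).all (fun c => PySem.Set.contains (pvGridGet dp i k) (String.mk [c])) &&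
  (v.toList.drop 1).all (fun c => PySem.Set.contains (pvGridGet dp (k+1) j) (String.mk [c]))

-- body of 'for value in grammar[keys]:'
def pvValStepA (tokens : List String) (i k j : Nat) (kv : String × List String)
    (dp : pvGrid) (v : String) : pvGrid :=
  if !(tokens.contains v) && (PySem.Str.len v == 2) then
    (if pvCondA dp i k j v then pvGridAdd dp i j kv.1 else dp)
  else dp

-- 'for k in range(i, j): for keys in grammar: for value in grammar[keys]: …'
def pvCellA (grammar : List (String × List String)) (tokens : List String) (i j : Nat)
    (dp : pvGrid) : pvGrid :=
  (List.range' i (j - i)).foldl (fun dp k =>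
    grammar.foldl (fun dp kv => kv.2.foldl (pvValStepA tokens i k j kv) dp) dp) dp

def cykCheck (grammar : List (String × List String)) (tokens : List String) : Bool :=
  let n := tokens.length
  let dp0 : pvGrid := PySem.Dict.empty
  -- 'for i in range(1, n+1):' — the same diagonal fill, repeated n times
  let dp1 := (List.range' 1 n).foldl (fun dp _i => pvDiagA grammar tokens dp) dp0
  -- 'for l in range(2, n+1): for i in range(1, n-l+2): j = i+l-1; …'
  let dp2 := (List.range' 2 (n - 1)).foldl (fun dp l =>
    (List.range' 1 (n - l + 1)).foldl (fun dp i => pvCellA grammar tokens i (i + l - 1) dp) dp) dp1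
  PySem.Set.contains (pvGridGet dp2 1 n) "S"

-- ===== PORT B =====
-- grammar[sym] (first match; dict keys are unique under Pre_)
def pvLookup (grammar : List (String × List String)) (sym : String) : List String :=
  ((grammar.find? (fun kv => kv.1 == sym)).map Prod.snd).getD []

-- '[(v[0], v[1]) for v in values if len(v) == 2 and v not in token_set]'
-- (v[0]/v[1] as take/drop of the char list: exact, since the filter keeps len-2 strings only)
def pvBinRules (tokenSet : PySem.Set String) (values : List String) : List (String × String) :=
  (values.filter (fun v => (PySem.Str.len v == 2) && !(PySem.Set.contains tokenSet v))).map
    (fun v => (String.mk (v.toList.take 1), String.mk (v.toList.drop 1)))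

-- 'binary = {}; for key, values in grammar.items(): binary[key] = [...]'
def pvBinDict (grammar : List (String × List String)) (tokens : List String) :
    PySem.Dict String (List (String × String)) :=
  grammar.foldl (fun d kv => d.insert kv.1 (pvBinRules (PySem.Set.ofList tokens) kv.2))
    PySem.Dict.empty

abbrev pvMemo : Type := PySem.Dict (String × Nat × Nat) Bool

mutual
-- 'def derives(sym, i, j): …' — the fuel argument only makes the recursion structural:
-- every call made has fuel ≥ j - i, so the fuel-0 branch is never reached.
def pvDerives (grammar : List (String × List String)) (tokens : List String)
    (binary : PySem.Dict String (List (String × String)))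
    (fuel : Nat) (memo : pvMemo) (sym : String) (i j : Nat) : Bool × pvMemo :=
  match memo.get? (sym, i, j) with
  | some b => (b, memo)
  | none =>
    if i = j then
      let tok := tokens.getD i ""
      let res := ((grammar.any (fun kv => kv.1 == sym)) && (pvLookup grammar sym).contains tok)
                 || (sym == "K" && !((["if", "else"] : List String).contains tok))
      (res, memo.insert (sym, i, j) res)
    else
      match fuel with
      | 0 => (false, memo)
      | f + 1 =>
        let r := pvTryRules grammar tokens binary f (binary.getD sym []) memo i j
        (r.1, r.2.insert (sym, i, j) r.1)
termination_by (fuel, 0, 0)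

-- 'for b, c in binary.get(sym, []): … if res: break'
def pvTryRules (grammar : List (String × List String)) (tokens : List String)
    (binary : PySem.Dict String (List (String × String)))
    (fuel : Nat) (rules : List (String × String)) (memo : pvMemo) (i j : Nat) : Bool × pvMemo :=
  match rules with
  | [] => (false, memo)
  | bc :: rest =>
    let r := pvTrySplits grammar tokens binary fuel bc.1 bc.2 (List.range' i (j - i)) memo i j
    if r.1 then (true, r.2) else pvTryRules grammar tokens binary fuel rest r.2 i j
termination_by (fuel, 1, rules.length)

-- 'for k in range(i, j): if derives(b, i, k) and derives(c, k + 1, j): res = True; break'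
def pvTrySplits (grammar : List (String × List String)) (tokens : List String)
    (binary : PySem.Dict String (List (String × String)))
    (fuel : Nat) (b c : String) (ks : List Nat) (memo : pvMemo) (i j : Nat) : Bool × pvMemo :=
  match ks with
  | [] => (false, memo)
  | k :: rest =>
    let rb := pvDerives grammar tokens binary fuel memo b i k
    if rb.1 then
      let rc := pvDerives grammar tokens binary fuel rb.2 c (k + 1) j
      if rc.1 then (true, rc.2)
      else pvTrySplits grammar tokens binary fuel b c rest rc.2 i j
    else pvTrySplits grammar tokens binary fuel b c rest rb.2 i j
termination_by (fuel, 0, ks.length + 1)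
end

def cykCheck_alt (grammar : List (String × List String)) (tokens : List String) : Bool :=
  let n := tokens.length
  let binary := pvBinDict grammar tokens
  -- 'return n > 0 and derives('S', 0, n - 1)'
  decide (n > 0) && (pvDerives grammar tokens binary n PySem.Dict.empty "S" 0 (n - 1)).1

-- ===== PRECONDITION & SPEC =====
-- A raises IndexError on tokens = [] (it reads dp[1][0] of a 1×1 matrix); and grammar is a
-- Python dict, whose key list can have no duplicates — the Nodup conjunct is that
-- representation invariant of the association-list encoding, not a narrowing of A's domain.
def Pre_cykCheck (grammar : List (String × List String)) (tokens : List String) : Prop :=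
  tokens ≠ [] ∧ (grammar.map Prod.fst).Nodup
instance (grammar : List (String × List String)) (tokens : List String) :
    Decidable (Pre_cykCheck grammar tokens) := by unfold Pre_cykCheck; infer_instance

def pvWitness_cykCheck : (List (String × List String)) × List String :=
  ([("S", ["AB"]), ("A", ["a"]), ("B", ["b"])], ["a", "b"])

def Spec_cykCheck (grammar : List (String × List String)) (tokens : List String) (out : Bool) : Prop := out = cykCheck_alt grammar tokens
instance (grammar : List (String × List String)) (tokens : List String) (out : Bool) : Decidable (Spec_cykCheck grammar tokens out) := by unfold Spec_cykCheck; infer_instance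

-- ===== CLAIM (what is proved, stated in full; the proofs are below) =====
def Claim_equal_cykCheck : Prop := ∀ (grammar : List (String × List String)) (tokens : List String), Dom_cykCheck grammar tokens → Pre_cykCheck grammar tokens → Spec_cykCheck grammar tokens (cykCheck grammar tokens)

-- ===== LEMMAS AND PROOFS =====


-- ---- the reference predicate: pvSpecB w sym i0  ⟺  sym derivable over the width-w span
-- starting at 0-indexed token position i0 (the common meaning of both programs' tables) ----
def pvSpecB (grammar : List (String × List String)) (tokens : List String) :
    Nat → String → Nat → Bool
  | 0, sym, i =>
      (grammar.any (fun kv => kv.1 == sym && kv.2.contains (tokens.getD i ""))) ||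
      (sym == "K" && !((["if", "else"] : List String).contains (tokens.getD i "")))
  | w + 1, sym, i =>
      grammar.any (fun kv => kv.1 == sym && kv.2.any (fun v =>
        ((!(tokens.contains v) && (PySem.Str.len v == 2)) &&
         ((List.range (w + 1)).attach.any (fun d =>
            pvSpecB grammar tokens d.1 (String.mk (v.toList.take 1)) i &&
            pvSpecB grammar tokens (w - d.1) (String.mk (v.toList.drop 1)) (i + d.1 + 1))))))
termination_by w _ _ => w
decreasing_by
  · exact List.mem_range.mp d.2
  · omega

theorem pv_specB_zero_iff (grammar : List (String × List String)) (tokens : List String)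
    (sym : String) (i : Nat) :
    pvSpecB grammar tokens 0 sym i = true ↔
      (∃ kv ∈ grammar, sym = kv.1 ∧ kv.2.contains (tokens.getD i "") = true) ∨
      (sym = "K" ∧ (["if", "else"] : List String).contains (tokens.getD i "") = false) := by
  rw [pvSpecB]
  simp only [Bool.or_eq_true, List.any_eq_true, Bool.and_eq_true, beq_iff_eq,
    Bool.not_eq_true']
  constructor
  · rintro (⟨kv, hkv, h1, h2⟩ | ⟨h1, h2⟩)
    · exact Or.inl ⟨kv, hkv, h1.symm, h2⟩
    · exact Or.inr ⟨h1, h2⟩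
  · rintro (⟨kv, hkv, h1, h2⟩ | ⟨h1, h2⟩)
    · exact Or.inl ⟨kv, hkv, h1.symm, h2⟩
    · exact Or.inr ⟨h1, h2⟩

theorem pv_specB_succ_iff (grammar : List (String × List String)) (tokens : List String)
    (w : Nat) (sym : String) (i : Nat) :
    pvSpecB grammar tokens (w + 1) sym i = true ↔
      ∃ kv ∈ grammar, sym = kv.1 ∧ ∃ v ∈ kv.2,
        (!(tokens.contains v) && (PySem.Str.len v == 2)) = true ∧
        ∃ d, d < w + 1 ∧
          pvSpecB grammar tokens d (String.mk (v.toList.take 1)) i = true ∧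
          pvSpecB grammar tokens (w - d) (String.mk (v.toList.drop 1)) (i + d + 1) = true := by
  rw [pvSpecB]
  simp only [List.any_eq_true, Bool.and_eq_true, beq_iff_eq, List.mem_attach, true_and,
    Subtype.exists, List.mem_range]
  constructor
  · rintro ⟨kv, hkv, h1, v, hv, hg, d, hd, h2, h3⟩
    exact ⟨kv, hkv, h1.symm, v, hv, hg, d, hd, h2, h3⟩
  · rintro ⟨kv, hkv, h1, v, hv, hg, d, hd, h2, h3⟩
    exact ⟨kv, hkv, h1.symm, v, hv, hg, d, hd, h2, h3⟩

-- ---- grid basics ----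
theorem pvGridAdd_ne (dp : pvGrid) (i j a b : Nat) (x : String) (h : ¬(a = i ∧ b = j)) :
    pvGridGet (pvGridAdd dp i j x) a b = pvGridGet dp a b := by
  unfold pvGridGet pvGridAdd
  rw [PySem.Dict.getD_insert,
    if_neg (fun hh => h (by rw [Prod.mk.injEq] at hh; exact hh))]

theorem pvGridAdd_self (dp : pvGrid) (i j : Nat) (x : String) :
    pvGridGet (pvGridAdd dp i j x) i j = PySem.Set.add (pvGridGet dp i j) x := by
  show PySem.Dict.getD _ _ _ = _
  unfold pvGridAdd
  rw [PySem.Dict.getD_insert, if_pos rfl]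

-- ---- generic fold lemmas ----
theorem pv_foldl_id {σ β : Type} (l : List β) (s : σ) :
    l.foldl (fun s _ => s) s = s := by
  induction l <;> simp [*]

theorem pv_foldl_flatMap {α β σ : Type} (l : List α) (f : α → List β) (g : σ → β → σ)
    (init : σ) :
    (l.flatMap f).foldl g init = l.foldl (fun s a => (f a).foldl g s) init := by
  induction l generalizing init <;> simp [List.foldl_append, *]

-- membership through a fold whose step adds a dp-independent set of elements
theorem pv_foldl_mem_additive {β : Type} (G : pvGrid → β → pvGrid)
    (P : β → Nat → Nat → String → Prop)
    (hG : ∀ dp x a b y, y ∈ pvGridGet (G dp x) a b ↔ y ∈ pvGridGet dp a b ∨ P x a b y) :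
    ∀ (l : List β) (dp : pvGrid) (a b : Nat) (y : String),
      y ∈ pvGridGet (l.foldl G dp) a b ↔ y ∈ pvGridGet dp a b ∨ ∃ x ∈ l, P x a b y := by
  intro l
  induction l with
  | nil => simp
  | cons x rest ih =>
    intro dp a b y
    simp only [List.foldl_cons, ih, hG, List.mem_cons]
    constructor
    · rintro ((h | h) | ⟨x', hx', h⟩)
      · exact Or.inl h
      · exact Or.inr ⟨x, Or.inl rfl, h⟩
      · exact Or.inr ⟨x', Or.inr hx', h⟩
    · rintro (h | ⟨x', (rfl | hx'), h⟩)
      · exact Or.inl (Or.inl h)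
      · exact Or.inl (Or.inr h)
      · exact Or.inr ⟨x', hx', h⟩

-- iterating a membership-additive step any positive number of times adds the same elements
theorem pv_foldl_rep (F : pvGrid → pvGrid) (P : Nat → Nat → String → Prop)
    (hF : ∀ dp a b y, y ∈ pvGridGet (F dp) a b ↔ y ∈ pvGridGet dp a b ∨ P a b y) :
    ∀ (L : List Nat) (dp : pvGrid) (a b : Nat) (y : String),
      y ∈ pvGridGet (L.foldl (fun dp _ => F dp) dp) a b ↔
        y ∈ pvGridGet dp a b ∨ (L ≠ [] ∧ P a b y) := by
  intro L
  induction L with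
  | nil => simp
  | cons m rest ih =>
    intro dp a b y
    simp only [List.foldl_cons, ih, hF]
    constructor
    · rintro ((h | h) | ⟨-, h⟩)
      · exact Or.inl h
      · exact Or.inr ⟨by simp, h⟩
      · exact Or.inr ⟨by simp, h⟩
    · rintro (h | ⟨-, h⟩)
      · exact Or.inl (Or.inl h)
      · exact Or.inl (Or.inr h)

-- ---- A-side diagonal characterization ----
-- what one iteration of the diagonal loop adds at position j
def pvDiagE (tokens : List String) (kv : String × List String) (j a b : Nat) (y : String) :
    Prop :=
  a = j + 1 ∧ b = j + 1 ∧
    ((y = kv.1 ∧ kv.2.contains (tokens.getD j "") = true) ∨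
     (y = "K" ∧ (["if", "else"] : List String).contains (tokens.getD j "") = false))

theorem pv_diagBody_mem (tokens : List String) (kv : String × List String) (dp : pvGrid)
    (j a b : Nat) (y : String) :
    y ∈ pvGridGet (pvDiagBody tokens kv dp j) a b ↔
      y ∈ pvGridGet dp a b ∨ pvDiagE tokens kv j a b y := by
  by_cases hab : a = j + 1 ∧ b = j + 1
  · obtain ⟨ha, hb⟩ := hab
    subst ha; subst hb
    unfold pvDiagBody pvDiagE
    split_ifs with h1 h2 h2 <;>
      simp_all [pvGridAdd_self, PySem.Set.mem_add] <;> tauto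
  · unfold pvDiagBody pvDiagE
    split_ifs <;> simp_all [pvGridAdd_ne _ _ _ _ _ _ hab] <;> tauto

theorem pv_diagA_mem (grammar : List (String × List String)) (tokens : List String)
    (dp : pvGrid) (a b : Nat) (y : String) :
    y ∈ pvGridGet (pvDiagA grammar tokens dp) a b ↔
      y ∈ pvGridGet dp a b ∨ ∃ kv ∈ grammar, ∃ j ∈ List.range tokens.length,
        pvDiagE tokens kv j a b y := by
  unfold pvDiagA
  exact pv_foldl_mem_additive _ _
    (fun dp kv a b y => pv_foldl_mem_additive _ _ (pv_diagBody_mem tokens kv) _ dp a b y)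
    grammar dp a b y

-- ---- A-side main-loop cell characterization ----
theorem pv_condA_congr (dp dp' : pvGrid) (i k j : Nat) (v : String)
    (h1 : pvGridGet dp' i k = pvGridGet dp i k)
    (h2 : pvGridGet dp' (k+1) j = pvGridGet dp (k+1) j) :
    pvCondA dp' i k j v = pvCondA dp i k j v := by
  simp [pvCondA, h1, h2]

theorem pv_valStepA_off (tokens : List String) (i k j : Nat) (kv : String × List String)
    (dp : pvGrid) (v : String) (a b : Nat) (h : ¬(a = i ∧ b = j)) :
    pvGridGet (pvValStepA tokens i k j kv dp v) a b = pvGridGet dp a b := by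
  unfold pvValStepA
  split_ifs <;> simp [pvGridAdd_ne _ _ _ _ _ _ h]

theorem pv_valFoldA (tokens : List String) (i k j : Nat) (kv : String × List String)
    (hki : i ≤ k) (hkj : k ≠ j) (vs : List String) :
    ∀ dp : pvGrid,
      (∀ a b, ¬(a = i ∧ b = j) →
        pvGridGet (vs.foldl (pvValStepA tokens i k j kv) dp) a b = pvGridGet dp a b) ∧
      (∀ y, y ∈ pvGridGet (vs.foldl (pvValStepA tokens i k j kv) dp) i j ↔
        y ∈ pvGridGet dp i j ∨ ∃ v ∈ vs, (!(tokens.contains v) && (PySem.Str.len v == 2)) = true ∧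
          y = kv.1 ∧ pvCondA dp i k j v = true) := by
  induction vs with
  | nil => intro dp; exact ⟨fun a b _ => rfl, by simp⟩
  | cons v rest ih =>
    intro dp
    have hik : ¬(i = i ∧ k = j) := fun h => hkj h.2
    have hk1 : ¬(k + 1 = i ∧ j = j) := fun h => by omega
    have hoff1 : ∀ a b, ¬(a = i ∧ b = j) →
        pvGridGet (pvValStepA tokens i k j kv dp v) a b = pvGridGet dp a b :=
      fun a b h => pv_valStepA_off tokens i k j kv dp v a b h
    have hcond : ∀ w, pvCondA (pvValStepA tokens i k j kv dp v) i k j w = pvCondA dp i k j w :=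
      fun w => pv_condA_congr _ _ _ _ _ _ (hoff1 i k hik) (hoff1 (k+1) j hk1)
    obtain ⟨ihoff, ihmem⟩ := ih (pvValStepA tokens i k j kv dp v)
    refine ⟨fun a b h => by rw [List.foldl_cons, ihoff a b h, hoff1 a b h], fun y => ?_⟩
    rw [List.foldl_cons, ihmem y]
    have hstep : y ∈ pvGridGet (pvValStepA tokens i k j kv dp v) i j ↔
        y ∈ pvGridGet dp i j ∨ ((!(tokens.contains v) && (PySem.Str.len v == 2)) = true ∧
          pvCondA dp i k j v = true ∧ y = kv.1) := by
      unfold pvValStepA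
      split_ifs with h1 h2 <;> simp_all [pvGridAdd_self, PySem.Set.mem_add] <;> tauto
    simp only [hcond, hstep, List.mem_cons]
    constructor
    · rintro ((h | ⟨h1, h2, h3⟩) | ⟨v', hv', h⟩)
      · exact Or.inl h
      · exact Or.inr ⟨v, Or.inl rfl, h1, h3, h2⟩
      · exact Or.inr ⟨v', Or.inr hv', h⟩
    · rintro (h | ⟨v', (rfl | hv'), h1, h2, h3⟩)
      · exact Or.inl (Or.inl h)
      · exact Or.inl (Or.inr ⟨h1, h3, h2⟩)
      · exact Or.inr ⟨v', hv', h1, h2, h3⟩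

theorem pv_keyFoldA (grammar : List (String × List String)) (tokens : List String)
    (i k j : Nat) (hki : i ≤ k) (hkj : k ≠ j) :
    ∀ dp : pvGrid,
      (∀ a b, ¬(a = i ∧ b = j) →
        pvGridGet (grammar.foldl (fun dp kv => kv.2.foldl (pvValStepA tokens i k j kv) dp) dp) a b
          = pvGridGet dp a b) ∧
      (∀ y, y ∈ pvGridGet
          (grammar.foldl (fun dp kv => kv.2.foldl (pvValStepA tokens i k j kv) dp) dp) i j ↔
        y ∈ pvGridGet dp i j ∨ ∃ kv ∈ grammar, ∃ v ∈ kv.2,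
          (!(tokens.contains v) && (PySem.Str.len v == 2)) = true ∧
          y = kv.1 ∧ pvCondA dp i k j v = true) := by
  induction grammar with
  | nil => intro dp; exact ⟨fun a b _ => rfl, by simp⟩
  | cons kv rest ih =>
    intro dp
    have hik : ¬(i = i ∧ k = j) := fun h => hkj h.2
    have hk1 : ¬(k + 1 = i ∧ j = j) := fun h => by omega
    obtain ⟨hoff1, hmem1⟩ := pv_valFoldA tokens i k j kv hki hkj kv.2 dp
    set dp' := kv.2.foldl (pvValStepA tokens i k j kv) dp with hdp'
    have hcond : ∀ w, pvCondA dp' i k j w = pvCondA dp i k j w :=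
      fun w => pv_condA_congr _ _ _ _ _ _ (hoff1 i k hik) (hoff1 (k+1) j hk1)
    obtain ⟨ihoff, ihmem⟩ := ih dp'
    refine ⟨fun a b h => by rw [List.foldl_cons, ihoff a b h, hoff1 a b h], fun y => ?_⟩
    rw [List.foldl_cons, ihmem y]
    simp only [hcond, hmem1 y, List.mem_cons]
    constructor
    · rintro ((h | ⟨v, hv, h1, h2, h3⟩) | ⟨kv', hkv', h⟩)
      · exact Or.inl h
      · exact Or.inr ⟨kv, Or.inl rfl, v, hv, h1, h2, h3⟩
      · exact Or.inr ⟨kv', Or.inr hkv', h⟩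
    · rintro (h | ⟨kv', (rfl | hkv'), h⟩)
      · exact Or.inl (Or.inl h)
      · exact Or.inl (Or.inr h)
      · exact Or.inr ⟨kv', hkv', h⟩

theorem pv_kFoldA (grammar : List (String × List String)) (tokens : List String)
    (i j : Nat) (ks : List Nat) (hks : ∀ k ∈ ks, i ≤ k ∧ k ≠ j) :
    ∀ dp : pvGrid,
      (∀ a b, ¬(a = i ∧ b = j) →
        pvGridGet (ks.foldl (fun dp k => grammar.foldl
          (fun dp kv => kv.2.foldl (pvValStepA tokens i k j kv) dp) dp) dp) a b
          = pvGridGet dp a b) ∧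
      (∀ y, y ∈ pvGridGet (ks.foldl (fun dp k => grammar.foldl
          (fun dp kv => kv.2.foldl (pvValStepA tokens i k j kv) dp) dp) dp) i j ↔
        y ∈ pvGridGet dp i j ∨ ∃ k ∈ ks, ∃ kv ∈ grammar, ∃ v ∈ kv.2,
          (!(tokens.contains v) && (PySem.Str.len v == 2)) = true ∧
          y = kv.1 ∧ pvCondA dp i k j v = true) := by
  induction ks with
  | nil => intro dp; exact ⟨fun a b _ => rfl, by simp⟩
  | cons k rest ih =>
    intro dp
    obtain ⟨hki, hkj⟩ := hks k (by simp)
    obtain ⟨hoff1, hmem1⟩ := pv_keyFoldA grammar tokens i k j hki hkj dp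
    set dp' := grammar.foldl (fun dp kv => kv.2.foldl (pvValStepA tokens i k j kv) dp) dp
      with hdp'
    have hcong : ∀ k' w, i ≤ k' → k' ≠ j → pvCondA dp' i k' j w = pvCondA dp i k' j w := by
      intro k' w hk'i hk'j
      exact pv_condA_congr _ _ _ _ _ _
        (hoff1 i k' (fun h => hk'j h.2)) (hoff1 (k'+1) j (fun h => by omega))
    obtain ⟨ihoff, ihmem⟩ := ih (fun k' hk' => hks k' (by simp [hk'])) dp'
    refine ⟨fun a b h => by rw [List.foldl_cons, ihoff a b h, hoff1 a b h], fun y => ?_⟩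
    rw [List.foldl_cons, ihmem y]
    rw [hmem1 y]
    constructor
    · rintro ((h | ⟨kv, hkv, v, hv, h1, h2, h3⟩) | ⟨k', hk', kv, hkv, v, hv, h1, h2, h3⟩)
      · exact Or.inl h
      · exact Or.inr ⟨k, by simp, kv, hkv, v, hv, h1, h2, h3⟩
      · obtain ⟨hk'i, hk'j⟩ := hks k' (by simp [hk'])
        rw [hcong k' v hk'i hk'j] at h3
        exact Or.inr ⟨k', by simp [hk'], kv, hkv, v, hv, h1, h2, h3⟩
    · rintro (h | ⟨k', hk', kv, hkv, v, hv, h1, h2, h3⟩)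
      · exact Or.inl (Or.inl h)
      · rcases List.mem_cons.mp hk' with rfl | hk'
        · exact Or.inl (Or.inr ⟨kv, hkv, v, hv, h1, h2, h3⟩)
        · obtain ⟨hk'i, hk'j⟩ := hks k' (by simp [hk'])
          refine Or.inr ⟨k', hk', kv, hkv, v, hv, h1, h2, ?_⟩
          rw [hcong k' v hk'i hk'j]; exact h3


-- ---- helpers on sets / strings ----
theorem pv_set_contains_iff {s : PySem.Set String} {y : String} :
    PySem.Set.contains s y = true ↔ y ∈ s := PySem.Set.contains_iff _ _

theorem pv_tokenSet_contains (tokens : List String) (v : String) :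
    PySem.Set.contains (PySem.Set.ofList tokens) v = tokens.contains v := by
  rw [Bool.eq_iff_iff, pv_set_contains_iff, PySem.Set.mem_ofList, List.contains_iff_mem]

theorem pv_len2 (v : String) (h : (PySem.Str.len v == 2) = true) :
    ∃ c1 c2, v.toList = [c1, c2] := by
  rw [beq_iff_eq] at h
  simp only [PySem.Str.len_eq] at h
  have h1 : v.length = 2 := by exact_mod_cast h
  have h2 : v.toList.length = 2 := by rw [String.length_toList]; exact h1
  exact List.length_eq_two.mp h2

theorem pv_condA_two (dp : pvGrid) (i k j : Nat) (v : String) (c1 c2 : Char)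
    (hv : v.toList = [c1, c2]) :
    pvCondA dp i k j v =
      (PySem.Set.contains (pvGridGet dp i k) (String.mk [c1]) &&
       PySem.Set.contains (pvGridGet dp (k + 1) j) (String.mk [c2])) := by
  simp [pvCondA, hv]

-- ---- the list of phase-2 cells, and the nested loops as one fold over it ----
def pvCells (n : Nat) : List (Nat × Nat) :=
  (List.range' 2 (n - 1)).flatMap (fun l => (List.range' 1 (n - l + 1)).map (fun i => (l, i)))

theorem pv_foldl_cells {σ : Type} (n : Nat) (F : σ → Nat → Nat → σ) (s : σ) :
    (List.range' 2 (n - 1)).foldl (fun s l =>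
      (List.range' 1 (n - l + 1)).foldl (fun s i => F s l i) s) s =
    (pvCells n).foldl (fun s li => F s li.1 li.2) s := by
  unfold pvCells
  rw [pv_foldl_flatMap]
  simp only [List.foldl_map]

theorem pv_mem_cells (n : Nat) (li : Nat × Nat) (h : li ∈ pvCells n) :
    2 ≤ li.1 ∧ li.1 ≤ n ∧ 1 ≤ li.2 ∧ li.2 + li.1 - 1 ≤ n := by
  unfold pvCells at h
  simp only [List.mem_flatMap, List.mem_map, List.mem_range'] at h
  obtain ⟨l, ⟨ml, hml, rfl⟩, i, ⟨mi, hmi, rfl⟩, rfl⟩ := h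
  simp only
  omega

theorem pv_cells_in (n a b : Nat) (ha : 1 ≤ a) (hab : a < b) (hb : b ≤ n) :
    (b - a + 1, a) ∈ pvCells n := by
  unfold pvCells
  simp only [List.mem_flatMap, List.mem_map, List.mem_range']
  refine ⟨b - a + 1, ⟨b - a - 1, by omega, by omega⟩, ⟨a, ⟨a - 1, by omega, by omega⟩, rfl⟩⟩

theorem pv_cells_nodup (n : Nat) :
    ((pvCells n).map (fun li => (li.2, li.2 + li.1 - 1))).Nodup := by
  unfold pvCells
  rw [List.map_flatMap]
  rw [List.nodup_flatMap]
  constructor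
  · intro l hl
    rw [List.map_map]
    refine (List.nodup_range').map ?_
    intro i i' h
    have := congrArg Prod.fst h
    simpa using this
  · have hp : (List.range' 2 (n - 1)).Pairwise (· < ·) := List.pairwise_lt_range' ..
    refine List.Pairwise.imp_of_mem ?_ hp
    intro l1 l2 hl1 hl2 hlt x hx1 hx2
    simp only [List.map_map, List.mem_map, List.mem_range', Function.comp] at hx1 hx2
    obtain ⟨i1, hi1, rfl⟩ := hx1
    obtain ⟨i2, hi2, hx⟩ := hx2
    have h1 := congrArg Prod.fst hx
    have h2 := congrArg Prod.snd hx
    simp only at h1 h2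
    have hl1' : 2 ≤ l1 := by obtain ⟨m, -, rfl⟩ := List.mem_range'.mp hl1; omega
    have hl2' : 2 ≤ l2 := by obtain ⟨m, -, rfl⟩ := List.mem_range'.mp hl2; omega
    omega

theorem pv_cells_pairwise (n : Nat) :
    (pvCells n).Pairwise (fun x y => x.1 ≤ y.1) := by
  unfold pvCells
  rw [List.pairwise_flatMap]
  constructor
  · intro l hl
    rw [List.pairwise_map]
    exact List.Pairwise.imp (fun _ => le_refl l) (List.pairwise_lt_range' ..)
  · have hp : (List.range' 2 (n - 1)).Pairwise (· < ·) := List.pairwise_lt_range' ..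
    refine List.Pairwise.imp_of_mem ?_ hp
    intro l1 l2 hl1 hl2 hlt x hx y hy
    simp only [List.mem_map] at hx hy
    obtain ⟨i1, -, rfl⟩ := hx
    obtain ⟨i2, -, rfl⟩ := hy
    exact le_of_lt hlt

-- ---- the two phases of A, named ----
def pvPhase1 (grammar : List (String × List String)) (tokens : List String) : pvGrid :=
  (List.range' 1 tokens.length).foldl (fun dp _ => pvDiagA grammar tokens dp)
    PySem.Dict.empty

theorem pv_A_eq (grammar : List (String × List String)) (tokens : List String) :
    cykCheck grammar tokens =
      PySem.Set.contains
        (pvGridGet ((pvCells tokens.length).foldl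
          (fun dp li => pvCellA grammar tokens li.2 (li.2 + li.1 - 1) dp)
          (pvPhase1 grammar tokens)) 1 tokens.length) "S" := by
  simp only [cykCheck]
  rw [pv_foldl_cells tokens.length (fun dp l i => pvCellA grammar tokens i (i + l - 1) dp)]
  rfl

-- membership after the diagonal phase
theorem pv_phase1_mem (grammar : List (String × List String)) (tokens : List String)
    (a b : Nat) (y : String) :
    y ∈ pvGridGet (pvPhase1 grammar tokens) a b ↔
      (grammar ≠ [] ∧ ∃ j < tokens.length, a = j + 1 ∧ b = j + 1 ∧
        ((∃ kv ∈ grammar, y = kv.1 ∧ kv.2.contains (tokens.getD j "") = true) ∨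
         (y = "K" ∧ (["if", "else"] : List String).contains (tokens.getD j "") = false))) := by
  have hrep := pv_foldl_rep (pvDiagA grammar tokens)
    (fun a b y => ∃ kv ∈ grammar, ∃ j ∈ List.range tokens.length, pvDiagE tokens kv j a b y)
    (fun dp a b y => pv_diagA_mem grammar tokens dp a b y)
    (List.range' 1 tokens.length) PySem.Dict.empty a b y
  unfold pvPhase1
  rw [hrep]
  constructor
  · rintro (h | ⟨hne, kv, hkv, j, hj, ha, hb, hcase⟩)
    · exfalso; simp [pvGridGet, PySem.Dict.getD_empty, PySem.Set.empty] at h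
    have hg : grammar ≠ [] := by rintro rfl; exact absurd hkv (List.not_mem_nil)
    rw [List.mem_range] at hj
    refine ⟨hg, j, hj, ha, hb, ?_⟩
    rcases hcase with ⟨rfl, hc⟩ | ⟨rfl, hc⟩
    · exact Or.inl ⟨kv, hkv, rfl, hc⟩
    · exact Or.inr ⟨rfl, hc⟩
  · rintro ⟨hg, j, hj, ha, hb, hcase⟩
    have hne : List.range' 1 tokens.length ≠ [] := by
      simp only [ne_eq, List.range'_eq_nil_iff]
      omega
    rcases hcase with ⟨kv, hkv, rfl, hc⟩ | ⟨rfl, hc⟩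
    · exact Or.inr ⟨hne, kv, hkv, j, List.mem_range.mpr hj, ha, hb, Or.inl ⟨rfl, hc⟩⟩
    · cases grammar with
      | nil => exact absurd rfl hg
      | cons kv0 rest =>
        exact Or.inr ⟨hne, kv0, by simp, j, List.mem_range.mpr hj, ha, hb, Or.inr ⟨rfl, hc⟩⟩

theorem pv_phase1_diag (grammar : List (String × List String)) (tokens : List String)
    (hg : grammar ≠ []) (a : Nat) (ha : 1 ≤ a) (hb : a ≤ tokens.length) (y : String) :
    y ∈ pvGridGet (pvPhase1 grammar tokens) a a ↔
      pvSpecB grammar tokens 0 y (a - 1) = true := by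
  rw [pv_phase1_mem, pv_specB_zero_iff]
  constructor
  · rintro ⟨-, j, hj, rfl, -, hcase⟩
    simpa using hcase
  · intro hcase
    exact ⟨hg, a - 1, by omega, by omega, by omega, by simpa using hcase⟩

theorem pv_phase1_off (grammar : List (String × List String)) (tokens : List String)
    (a b : Nat) (hab : a ≠ b) (y : String) :
    y ∉ pvGridGet (pvPhase1 grammar tokens) a b := by
  rw [pv_phase1_mem]
  rintro ⟨-, j, -, rfl, rfl, -⟩
  exact hab rfl


-- pvCondA, spelled through the two halves of a length-2 production
theorem pv_condA_iff (dp : pvGrid) (i k j : Nat) (v : String)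
    (hlen : (PySem.Str.len v == 2) = true) :
    pvCondA dp i k j v = true ↔
      (String.mk (v.toList.take 1) ∈ pvGridGet dp i k ∧
       String.mk (v.toList.drop 1) ∈ pvGridGet dp (k + 1) j) := by
  obtain ⟨c1, c2, hv⟩ := pv_len2 v hlen
  rw [pv_condA_two dp i k j v c1 c2 hv, hv]
  simp only [List.take_succ_cons, List.take_zero, List.drop_succ_cons, List.drop_zero,
    Bool.and_eq_true, pv_set_contains_iff]

-- ---- the A-side invariant: after processing a (sorted, duplicate-free) suffix of cells,
-- every in-range cell holds exactly the symbols of the reference predicate ----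
theorem pv_A_spec (grammar : List (String × List String)) (tokens : List String) :
    ∀ (C : List (Nat × Nat)) (dp : pvGrid),
      ((C.map (fun li => (li.2, li.2 + li.1 - 1))).Nodup) →
      (C.Pairwise (fun x y => x.1 ≤ y.1)) →
      (∀ li ∈ C, 2 ≤ li.1 ∧ 1 ≤ li.2 ∧ li.2 + li.1 - 1 ≤ tokens.length) →
      (∀ li ∈ C, ∀ y, y ∉ pvGridGet dp li.2 (li.2 + li.1 - 1)) →
      (∀ a b y, 1 ≤ a → a ≤ b → b ≤ tokens.length → (b - a + 1, a) ∉ C →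
        (y ∈ pvGridGet dp a b ↔ pvSpecB grammar tokens (b - a) y (a - 1) = true)) →
      ∀ a b y, 1 ≤ a → a ≤ b → b ≤ tokens.length →
        (y ∈ pvGridGet
            (C.foldl (fun dp li => pvCellA grammar tokens li.2 (li.2 + li.1 - 1) dp) dp) a b ↔
          pvSpecB grammar tokens (b - a) y (a - 1) = true) := by
  intro C
  induction C with
  | nil =>
    intro dp _ _ _ _ h4 a b y ha hab hb
    exact h4 a b y ha hab hb (List.not_mem_nil)
  | cons li rest ih =>
    intro dp hnd hpw hbounds hemp h4 a b y ha hab hb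
    obtain ⟨hl2, hi1, hjn⟩ := hbounds li (by simp)
    set i := li.2 with hidef
    set j := li.2 + li.1 - 1 with hjdef
    have hij : i < j := by omega
    have hge : ∀ x ∈ li :: rest, li.1 ≤ x.1 := by
      intro x hx
      rcases List.mem_cons.mp hx with rfl | hx
      · exact le_refl _
      · exact List.rel_of_pairwise_cons hpw hx
    have hks : ∀ k ∈ List.range' i (j - i), i ≤ k ∧ k ≠ j := by
      intro k hk
      rw [List.mem_range'] at hk
      omega
    obtain ⟨hoffA, hmemA⟩ := pv_kFoldA grammar tokens i j (List.range' i (j - i)) hks dp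
    have hfold : pvCellA grammar tokens i j dp =
        (List.range' i (j - i)).foldl (fun dp k => grammar.foldl
          (fun dp kv => kv.2.foldl (pvValStepA tokens i k j kv) dp) dp) dp := rfl
    -- the freshly computed cell (i, j)
    have hself : ∀ y, y ∈ pvGridGet (pvCellA grammar tokens i j dp) i j ↔
        pvSpecB grammar tokens (j - i) y (i - 1) = true := by
      intro y
      rw [hfold, hmemA y]
      have hw : j - i = (j - i - 1) + 1 := by omega
      rw [hw, pv_specB_succ_iff]
      constructor
      · rintro (h | ⟨k, hk, kv, hkv, v, hv, hcond, rfl, hA⟩)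
        · exact absurd h (hemp li (by simp) y)
        · rw [List.mem_range'] at hk
          have hkj : k < j := by omega
          have hlen : (PySem.Str.len v == 2) = true := (Bool.and_eq_true_iff.mp hcond).2
          rw [pv_condA_iff dp i k j v hlen] at hA
          obtain ⟨hL, hR⟩ := hA
          have hsubL : (k - i + 1, i) ∉ li :: rest := by
            intro hmem
            have := hge _ hmem
            simp only at this
            omega
          have hsubR : (j - (k + 1) + 1, k + 1) ∉ li :: rest := by
            intro hmem
            have := hge _ hmem
            simp only at this
            omega
          rw [h4 i k _ hi1 (by omega) (by omega) hsubL] at hL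
          rw [h4 (k + 1) j _ (by omega) (by omega) (by omega) hsubR] at hR
          refine ⟨kv, hkv, rfl, v, hv, hcond, k - i, by omega, ?_, ?_⟩
          · exact hL
          · have e1 : j - (k + 1) = j - i - 1 - (k - i) := by omega
            have e2 : (k + 1) - 1 = (i - 1) + (k - i) + 1 := by omega
            rw [e1, e2] at hR
            exact hR
      · rintro ⟨kv, hkv, rfl, v, hv, hcond, d, hd, hL, hR⟩
        have hlen : (PySem.Str.len v == 2) = true := (Bool.and_eq_true_iff.mp hcond).2
        set k := i + d with hkdef
        have hkj : k < j := by omega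
        refine Or.inr ⟨k, by rw [List.mem_range']; exact ⟨d, by omega, by omega⟩,
          kv, hkv, v, hv, hcond, rfl, ?_⟩
        rw [pv_condA_iff dp i k j v hlen]
        have hsubL : (k - i + 1, i) ∉ li :: rest := by
          intro hmem
          have := hge _ hmem
          simp only at this
          omega
        have hsubR : (j - (k + 1) + 1, k + 1) ∉ li :: rest := by
          intro hmem
          have := hge _ hmem
          simp only at this
          omega
        rw [h4 i k _ hi1 (by omega) (by omega) hsubL,
          h4 (k + 1) j _ (by omega) (by omega) (by omega) hsubR]
        constructor
        · have e : k - i = d := by omega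
          rw [e]
          exact hL
        · have e1 : j - (k + 1) = j - i - 1 - d := by omega
          have e2 : (k + 1) - 1 = (i - 1) + d + 1 := by omega
          rw [e1, e2]
          exact hR
    -- cells other than (i, j) are untouched
    have hoff : ∀ a b, ¬(a = i ∧ b = j) →
        pvGridGet (pvCellA grammar tokens i j dp) a b = pvGridGet dp a b := by
      intro a b h
      rw [hfold]
      exact hoffA a b h
    rw [List.foldl_cons]
    rw [List.map_cons, List.nodup_cons] at hnd
    apply ih (pvCellA grammar tokens i j dp) hnd.2 (List.Pairwise.of_cons hpw)
      (fun x hx => hbounds x (by simp [hx]))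
      (fun x hx y' => by
        have hne : ¬(x.2 = i ∧ x.2 + x.1 - 1 = j) := by
          intro hh
          apply hnd.1
          have : (x.2, x.2 + x.1 - 1) = (li.2, li.2 + li.1 - 1) := by
            rw [Prod.mk.injEq]; exact ⟨hh.1, hh.2⟩
          rw [← this]
          exact List.mem_map_of_mem hx
        rw [hoff _ _ hne]
        exact hemp x (by simp [hx]) y')
      (fun a' b' y' ha' hab' hb' hnotin => by
        by_cases hcell : a' = i ∧ b' = j
        · obtain ⟨rfl, rfl⟩ := hcell
          exact hself y'
        · rw [hoff _ _ hcell]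
          apply h4 a' b' y' ha' hab' hb'
          intro hmem
          rcases List.mem_cons.mp hmem with heq | hmem'
          · apply hcell
            have h1 := congrArg Prod.fst heq
            have h2 := congrArg Prod.snd heq
            simp only at h1 h2
            constructor <;> omega
          · exact hnotin hmem')
      a b y ha hab hb

-- ---- A's two degenerate directions: empty grammar, and the top-level readout ----
theorem pv_A_empty (tokens : List String) : cykCheck [] tokens = false := by
  rw [pv_A_eq]
  have h1 : pvPhase1 [] tokens = (PySem.Dict.empty : pvGrid) := by
    unfold pvPhase1
    have h : (fun (dp : pvGrid) (_ : Nat) => pvDiagA [] tokens dp) = (fun dp _ => dp) := rfl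
    rw [h, pv_foldl_id]
  have h2 : (fun (dp : pvGrid) (li : Nat × Nat) =>
      pvCellA [] tokens li.2 (li.2 + li.1 - 1) dp) = (fun dp _ => dp) := by
    funext dp li
    show (List.range' li.2 _).foldl (fun dp _ => dp) dp = dp
    exact pv_foldl_id _ _
  rw [h1, h2, pv_foldl_id]
  rfl

theorem pv_A_top (grammar : List (String × List String)) (tokens : List String)
    (hg : grammar ≠ []) (ht : tokens.length ≠ 0) :
    cykCheck grammar tokens = pvSpecB grammar tokens (tokens.length - 1) "S" 0 := by
  rw [pv_A_eq, Bool.eq_iff_iff, pv_set_contains_iff]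
  have hmain := pv_A_spec grammar tokens (pvCells tokens.length) (pvPhase1 grammar tokens)
    (pv_cells_nodup _) (pv_cells_pairwise _)
    (fun li hli => by
      obtain ⟨h1, h2, h3, h4⟩ := pv_mem_cells _ _ hli
      exact ⟨h1, h3, h4⟩)
    (fun li hli y => by
      obtain ⟨h1, h2, h3, h4⟩ := pv_mem_cells _ _ hli
      exact pv_phase1_off grammar tokens _ _ (by omega) y)
    (fun a b y ha hab hb hnotin => by
      rcases Nat.lt_or_ge a b with hlt | hge
      · exact absurd (pv_cells_in tokens.length a b ha hlt hb) hnotin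
      · have hbe : a = b := by omega
        subst hbe
        have he : a - a = 0 := by omega
        rw [he]
        exact pv_phase1_diag grammar tokens hg a ha hb y)
    1 tokens.length "S" (by omega) (by omega) (by omega)
  simpa using hmain

theorem pv_specB_nil (tokens : List String) (w i : Nat) :
    pvSpecB [] tokens w "S" i = false := by
  cases w with
  | zero =>
    rw [pvSpecB]
    simp only [List.any_nil, Bool.false_or, Bool.and_eq_false_iff]
    left
    decide
  | succ w =>
    rw [pvSpecB]
    simp


-- ---- B-side: dictionary and lookup plumbing ----
theorem pv_no_key_any (grammar : List (String × List String)) (sym : String)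
    (h : sym ∉ grammar.map Prod.fst) (P : String × List String → Bool) :
    grammar.any (fun kv => kv.1 == sym && P kv) = false := by
  rw [← Bool.not_eq_true, List.any_eq_true]
  rintro ⟨kv, hkv, hh⟩
  rw [Bool.and_eq_true, beq_iff_eq] at hh
  exact h (List.mem_map.mpr ⟨kv, hkv, hh.1⟩)

theorem pv_lookup_cons_pos (kv : String × List String) (rest : List (String × List String))
    (sym : String) (h : kv.1 = sym) : pvLookup (kv :: rest) sym = kv.2 := by
  unfold pvLookup
  rw [List.find?_cons_of_pos (by simpa using h)]
  rfl

theorem pv_lookup_cons_neg (kv : String × List String) (rest : List (String × List String))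
    (sym : String) (h : kv.1 ≠ sym) : pvLookup (kv :: rest) sym = pvLookup rest sym := by
  unfold pvLookup
  rw [List.find?_cons_of_neg (by simpa using h)]

theorem pv_lookup_no_key (grammar : List (String × List String)) (sym : String)
    (h : sym ∉ grammar.map Prod.fst) : pvLookup grammar sym = [] := by
  unfold pvLookup
  rw [List.find?_eq_none.mpr]
  · rfl
  · intro kv hkv
    simp only [beq_iff_eq]
    intro heq
    exact h (List.mem_map.mpr ⟨kv, hkv, heq⟩)

-- a missing-key-safe dict access, as a statement about the key list
theorem pv_lookup_any (grammar : List (String × List String)) (sym : String)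
    (hnd : (grammar.map Prod.fst).Nodup) (P : List String → Bool) (hP : P [] = false) :
    P (pvLookup grammar sym) = grammar.any (fun kv => kv.1 == sym && P kv.2) := by
  induction grammar with
  | nil =>
    simp only [List.any_nil]
    unfold pvLookup
    simpa using hP
  | cons kv rest ih =>
    rw [List.map_cons, List.nodup_cons] at hnd
    by_cases h : kv.1 = sym
    · rw [pv_lookup_cons_pos kv rest sym h, List.any_cons]
      rw [pv_no_key_any rest sym (by rw [← h]; exact hnd.1) (fun kv => P kv.2)]
      simp [h]
    · rw [pv_lookup_cons_neg kv rest sym h, List.any_cons, ih hnd.2]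
      simp [h]

theorem pv_guard_any (grammar : List (String × List String)) (sym : String)
    (P : List String → Bool) (hP : P [] = false) :
    ((grammar.any (fun kv => kv.1 == sym)) && P (pvLookup grammar sym)) =
      P (pvLookup grammar sym) := by
  by_cases hs : grammar.any (fun kv => kv.1 == sym) = true
  · rw [hs, Bool.true_and]
  · rw [Bool.not_eq_true] at hs
    rw [hs, Bool.false_and]
    have hnk : sym ∉ grammar.map Prod.fst := by
      intro hmem
      obtain ⟨kv, hkv, hk⟩ := List.mem_map.mp hmem
      rw [← Bool.not_eq_true, List.any_eq_true] at hs
      · exact hs ⟨kv, hkv, by simpa using hk⟩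
    rw [pv_lookup_no_key grammar sym hnk, hP]

theorem pv_foldl_insert_skip (F : List String → List (String × String)) (sym : String) :
    ∀ (g : List (String × List String)) (d : PySem.Dict String (List (String × String))),
      sym ∉ g.map Prod.fst →
      (g.foldl (fun d kv => d.insert kv.1 (F kv.2)) d).getD sym [] = d.getD sym [] := by
  intro g
  induction g with
  | nil => intro d h; rfl
  | cons kv rest ih =>
    intro d h
    rw [List.map_cons] at h
    rw [List.foldl_cons, ih _ (fun hm => h (List.mem_cons_of_mem _ hm)),
      PySem.Dict.getD_insert, if_neg (fun he => h (by simp [he]))]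

theorem pv_foldl_insert_getD (F : List String → List (String × String)) (sym : String)
    (hF : F [] = []) :
    ∀ (g : List (String × List String)) (d : PySem.Dict String (List (String × String))),
      (g.map Prod.fst).Nodup → d.getD sym [] = [] →
      (g.foldl (fun d kv => d.insert kv.1 (F kv.2)) d).getD sym [] = F (pvLookup g sym) := by
  intro g
  induction g with
  | nil =>
    intro d _ hd
    unfold pvLookup
    simpa [hF] using hd
  | cons kv rest ih =>
    intro d hnd hd
    rw [List.map_cons, List.nodup_cons] at hnd
    rw [List.foldl_cons]
    by_cases h : kv.1 = sym
    · rw [pv_lookup_cons_pos kv rest sym h,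
        pv_foldl_insert_skip F sym rest _ (by rw [← h]; exact hnd.1),
        PySem.Dict.getD_insert, if_pos h.symm]
    · rw [pv_lookup_cons_neg kv rest sym h, ih _ hnd.2
        (by rw [PySem.Dict.getD_insert, if_neg (fun he => h he.symm)]; exact hd)]

theorem pv_binDict_getD (grammar : List (String × List String)) (tokens : List String)
    (sym : String) (hnd : (grammar.map Prod.fst).Nodup) :
    (pvBinDict grammar tokens).getD sym [] =
      pvBinRules (PySem.Set.ofList tokens) (pvLookup grammar sym) := by
  unfold pvBinDict
  exact pv_foldl_insert_getD _ sym rfl grammar PySem.Dict.empty hnd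
    (PySem.Dict.getD_empty _ _)

-- ---- B-side: the memo table invariant ----
def pvGood (grammar : List (String × List String)) (tokens : List String)
    (memo : pvMemo) : Prop :=
  ∀ s a b v, memo.get? (s, a, b) = some v → v = pvSpecB grammar tokens (b - a) s a

theorem pvGood_empty (grammar : List (String × List String)) (tokens : List String) :
    pvGood grammar tokens PySem.Dict.empty := by
  intro s a b v h
  rw [PySem.Dict.get?_empty] at h
  exact absurd h (by simp)

theorem pvGood_insert (grammar : List (String × List String)) (tokens : List String)
    (memo : pvMemo) (h : pvGood grammar tokens memo) (s : String) (a b : Nat) (v : Bool)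
    (hv : v = pvSpecB grammar tokens (b - a) s a) :
    pvGood grammar tokens (memo.insert (s, a, b) v) := by
  intro s' a' b' v' h'
  rw [PySem.Dict.get?_insert] at h'
  split_ifs at h' with he
  · obtain ⟨he1, he2, he3⟩ : s' = s ∧ a' = a ∧ b' = b := by
      simpa [Prod.ext_iff] using he
    subst he1; subst he2; subst he3
    rw [← Option.some_inj.mp h']
    exact hv
  · exact h s' a' b' v' h'

-- ---- B-side: the terminal (i = j) case of derives ----
theorem pv_derives_diag (grammar : List (String × List String)) (tokens : List String)
    (hnd : (grammar.map Prod.fst).Nodup) (fuel : Nat) (memo : pvMemo) (sym : String)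
    (i : Nat) (hgood : pvGood grammar tokens memo) :
    (pvDerives grammar tokens (pvBinDict grammar tokens) fuel memo sym i i).1 =
      pvSpecB grammar tokens 0 sym i ∧
    pvGood grammar tokens
      (pvDerives grammar tokens (pvBinDict grammar tokens) fuel memo sym i i).2 := by
  cases hm : memo.get? (sym, i, i) with
  | some v =>
    have hv := hgood sym i i v hm
    rw [pvDerives.eq_def, hm]
    simp only
    exact ⟨by rw [hv]; simp, hgood⟩
  | none =>
    rw [pvDerives.eq_def, hm, if_pos rfl]
    have hres : ((grammar.any (fun kv => kv.1 == sym)) &&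
          (pvLookup grammar sym).contains (tokens.getD i "")
        || (sym == "K" && !((["if", "else"] : List String).contains (tokens.getD i "")))) =
        pvSpecB grammar tokens 0 sym i := by
      rw [pvSpecB]
      rw [pv_guard_any grammar sym (fun vs => vs.contains (tokens.getD i "")) rfl,
        pv_lookup_any grammar sym hnd (fun vs => vs.contains (tokens.getD i "")) rfl]
    exact ⟨hres, pvGood_insert grammar tokens memo hgood sym i i _ (by rw [hres]; simp)⟩


-- what one pass of B's rule/split loops computes, folded back into the reference predicate
theorem pv_rules_any (grammar : List (String × List String)) (tokens : List String)
    (sym : String) (i j : Nat) (hnd : (grammar.map Prod.fst).Nodup) (hij : i < j) :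
    ((pvBinDict grammar tokens).getD sym []).any (fun bc =>
        (List.range' i (j - i)).any (fun k =>
          pvSpecB grammar tokens (k - i) bc.1 i &&
          pvSpecB grammar tokens (j - (k + 1)) bc.2 (k + 1))) =
      pvSpecB grammar tokens (j - i) sym i := by
  have hw : j - i = (j - i - 1) + 1 := by omega
  set w := j - i - 1 with hwdef
  rw [pv_binDict_getD grammar tokens sym hnd]
  unfold pvBinRules
  rw [List.any_map, List.any_filter]
  simp only [Function.comp]
  have hpt : (fun v => ((PySem.Str.len v == 2) && !(PySem.Set.contains (PySem.Set.ofList tokens) v)) &&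
        ((List.range' i (j - i)).any (fun k =>
          pvSpecB grammar tokens (k - i) (String.mk (v.toList.take 1)) i &&
          pvSpecB grammar tokens (j - (k + 1)) (String.mk (v.toList.drop 1)) (k + 1)))) =
      (fun v => ((!(tokens.contains v) && (PySem.Str.len v == 2)) &&
        ((List.range (w + 1)).attach.any (fun d =>
          pvSpecB grammar tokens d.1 (String.mk (v.toList.take 1)) i &&
          pvSpecB grammar tokens (w - d.1) (String.mk (v.toList.drop 1)) (i + d.1 + 1))))) := by
    funext v
    rw [pv_tokenSet_contains, Bool.and_comm (PySem.Str.len v == 2)]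
    congr 1
    rw [Bool.eq_iff_iff, List.any_eq_true, List.any_eq_true]
    constructor
    · rintro ⟨k, hk, h⟩
      rw [List.mem_range'] at hk
      obtain ⟨m, hm, rfl⟩ := hk
      refine ⟨⟨m, List.mem_range.mpr (by omega)⟩, List.mem_attach _ _, ?_⟩
      have e1 : (i + 1 * m) - i = m := by omega
      have e2 : w - m = j - ((i + 1 * m) + 1) := by omega
      have e3 : i + m + 1 = (i + 1 * m) + 1 := by omega
      rw [e2, e3]
      rw [e1] at h
      exact h
    · rintro ⟨⟨d, hd⟩, -, h⟩
      rw [List.mem_range] at hd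
      refine ⟨i + d, by rw [List.mem_range']; exact ⟨d, by omega, by omega⟩, ?_⟩
      have e1 : (i + d) - i = d := by omega
      have e2 : j - ((i + d) + 1) = w - d := by omega
      have e3 : i + d + 1 = (i + d) + 1 := rfl
      rw [e1, e2]
      exact h
  rw [hpt]
  have hlk := pv_lookup_any grammar sym hnd
      (fun vs => vs.any (fun v => ((!(tokens.contains v) && (PySem.Str.len v == 2)) &&
        ((List.range (w + 1)).attach.any (fun d =>
          pvSpecB grammar tokens d.1 (String.mk (v.toList.take 1)) i &&
          pvSpecB grammar tokens (w - d.1) (String.mk (v.toList.drop 1)) (i + d.1 + 1)))))) rfl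
  rw [hw, pvSpecB]
  exact hlk

-- ---- B-side: the main induction — derives computes the reference predicate ----
theorem pv_derives_eq (grammar : List (String × List String)) (tokens : List String)
    (hnd : (grammar.map Prod.fst).Nodup) :
    ∀ (fuel : Nat) (memo : pvMemo) (sym : String) (i j : Nat), i ≤ j → j - i ≤ fuel →
      pvGood grammar tokens memo →
      (pvDerives grammar tokens (pvBinDict grammar tokens) fuel memo sym i j).1 =
        pvSpecB grammar tokens (j - i) sym i ∧
      pvGood grammar tokens
        (pvDerives grammar tokens (pvBinDict grammar tokens) fuel memo sym i j).2 := by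
  intro fuel
  induction fuel with
  | zero =>
    intro memo sym i j hij hle hgood
    have he : i = j := by omega
    subst he
    simpa using pv_derives_diag grammar tokens hnd 0 memo sym i hgood
  | succ f ihf =>
    intro memo sym i j hij hle hgood
    by_cases hd : i = j
    · subst hd
      simpa using pv_derives_diag grammar tokens hnd (f + 1) memo sym i hgood
    · have hij' : i < j := by omega
      have htsp : ∀ (ks : List Nat) (memo : pvMemo) (b c : String),
          (∀ k ∈ ks, i ≤ k ∧ k < j) → pvGood grammar tokens memo →
          (pvTrySplits grammar tokens (pvBinDict grammar tokens) f b c ks memo i j).1 =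
            ks.any (fun k => pvSpecB grammar tokens (k - i) b i &&
              pvSpecB grammar tokens (j - (k + 1)) c (k + 1)) ∧
          pvGood grammar tokens
            (pvTrySplits grammar tokens (pvBinDict grammar tokens) f b c ks memo i j).2 := by
        intro ks
        induction ks with
        | nil =>
          intro memo b c _ hgood
          rw [pvTrySplits.eq_def]
          exact ⟨by simp, hgood⟩
        | cons k rest ihk =>
          intro memo b c hks hgood
          obtain ⟨hki, hkj⟩ := hks k (by simp)
          obtain ⟨hL1, hL2⟩ := ihf memo b i k hki (by omega) hgood
          rw [pvTrySplits.eq_def]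
          simp only
          by_cases hb1 : (pvDerives grammar tokens (pvBinDict grammar tokens) f memo b i k).1 = true
          · rw [if_pos hb1]
            obtain ⟨hR1, hR2⟩ := ihf
              (pvDerives grammar tokens (pvBinDict grammar tokens) f memo b i k).2
              c (k + 1) j (by omega) (by omega) hL2
            by_cases hc1 : (pvDerives grammar tokens (pvBinDict grammar tokens) f
                (pvDerives grammar tokens (pvBinDict grammar tokens) f memo b i k).2
                c (k + 1) j).1 = true
            · rw [if_pos hc1]
              refine ⟨?_, hR2⟩
              rw [List.any_cons, ← hL1, ← hR1, hb1, hc1]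
              rfl
            · rw [if_neg hc1]
              obtain ⟨hT1, hT2⟩ := ihk
                (pvDerives grammar tokens (pvBinDict grammar tokens) f
                  (pvDerives grammar tokens (pvBinDict grammar tokens) f memo b i k).2
                  c (k + 1) j).2
                b c (fun k' hk' => hks k' (by simp [hk'])) hR2
              refine ⟨?_, hT2⟩
              rw [List.any_cons, ← hL1, ← hR1, hb1, hT1]
              simp [Bool.not_eq_true] at hc1
              rw [hc1]
              rfl
          · rw [if_neg hb1]
            obtain ⟨hT1, hT2⟩ := ihk
              (pvDerives grammar tokens (pvBinDict grammar tokens) f memo b i k).2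
              b c (fun k' hk' => hks k' (by simp [hk'])) hL2
            refine ⟨?_, hT2⟩
            rw [List.any_cons, ← hL1, hT1]
            simp [Bool.not_eq_true] at hb1
            rw [hb1]
            rfl
      have htr : ∀ (rules : List (String × String)) (memo : pvMemo),
          pvGood grammar tokens memo →
          (pvTryRules grammar tokens (pvBinDict grammar tokens) f rules memo i j).1 =
            rules.any (fun bc => (List.range' i (j - i)).any (fun k =>
              pvSpecB grammar tokens (k - i) bc.1 i &&
              pvSpecB grammar tokens (j - (k + 1)) bc.2 (k + 1))) ∧
          pvGood grammar tokens
            (pvTryRules grammar tokens (pvBinDict grammar tokens) f rules memo i j).2 := by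
        intro rules
        induction rules with
        | nil =>
          intro memo hgood
          rw [pvTryRules.eq_def]
          exact ⟨by simp, hgood⟩
        | cons bc rest ihr =>
          intro memo hgood
          have hks : ∀ k ∈ List.range' i (j - i), i ≤ k ∧ k < j := by
            intro k hk
            rw [List.mem_range'] at hk
            omega
          obtain ⟨hS1, hS2⟩ := htsp (List.range' i (j - i)) memo bc.1 bc.2 hks hgood
          rw [pvTryRules.eq_def]
          simp only
          by_cases hr1 : (pvTrySplits grammar tokens (pvBinDict grammar tokens) f bc.1 bc.2
              (List.range' i (j - i)) memo i j).1 = true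
          · rw [if_pos hr1]
            refine ⟨?_, hS2⟩
            rw [List.any_cons, ← hS1, hr1]
            rfl
          · rw [if_neg hr1]
            obtain ⟨hT1, hT2⟩ := ihr (pvTrySplits grammar tokens (pvBinDict grammar tokens) f
              bc.1 bc.2 (List.range' i (j - i)) memo i j).2 hS2
            refine ⟨?_, hT2⟩
            rw [List.any_cons, ← hS1, hT1]
            simp [Bool.not_eq_true] at hr1
            rw [hr1]
            rfl
      cases hm : memo.get? (sym, i, j) with
      | some v =>
        rw [pvDerives.eq_def, hm]
        exact ⟨hgood sym i j v hm, hgood⟩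
      | none =>
        rw [pvDerives.eq_def, hm, if_neg hd]
        obtain ⟨hr1, hr2⟩ := htr ((pvBinDict grammar tokens).getD sym []) memo hgood
        have hval : (pvTryRules grammar tokens (pvBinDict grammar tokens) f
            ((pvBinDict grammar tokens).getD sym []) memo i j).1 =
            pvSpecB grammar tokens (j - i) sym i := by
          rw [hr1]
          exact pv_rules_any grammar tokens sym i j hnd hij'
        exact ⟨hval, pvGood_insert grammar tokens _ hr2 sym i j _ hval⟩

-- ---- B-side: top-level readout ----
theorem pv_B_top (grammar : List (String × List String)) (tokens : List String)
    (hnd : (grammar.map Prod.fst).Nodup) (ht : tokens.length ≠ 0) :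
    cykCheck_alt grammar tokens = pvSpecB grammar tokens (tokens.length - 1) "S" 0 := by
  show (decide (tokens.length > 0) &&
      (pvDerives grammar tokens (pvBinDict grammar tokens) tokens.length PySem.Dict.empty
        "S" 0 (tokens.length - 1)).1) = pvSpecB grammar tokens (tokens.length - 1) "S" 0
  rw [decide_eq_true (by omega : tokens.length > 0), Bool.true_and]
  have h := (pv_derives_eq grammar tokens hnd tokens.length PySem.Dict.empty "S" 0
    (tokens.length - 1) (by omega) (by omega) (pvGood_empty grammar tokens)).1
  simpa using h

-- ===== VERDICT (by name: the statements are the Claim_ definitions above) =====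
theorem cykCheck_spec : Claim_equal_cykCheck := by
  intro grammar tokens hdom hpre
  obtain ⟨ht, hnd⟩ := hpre
  unfold Spec_cykCheck
  have htlen : tokens.length ≠ 0 := fun h => ht (List.eq_nil_of_length_eq_zero h)
  by_cases hg : grammar = []
  · subst hg
    rw [pv_A_empty, pv_B_top [] tokens hnd htlen, pv_specB_nil]
  · rw [pv_A_top grammar tokens hg htlen, pv_B_top grammar tokens hnd htlen]
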